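-- pv_equiv track=rewrite | github.com/lukerbs/kestrel-seqtools | main.py | compute_add16
-- ===== SOURCE A (Python) =====
-- def compute_add16(dat):
--     # simple 16-bit additive checksum
--     s = 0
--     i = 0
--     dlen = len(dat)
--     while i < dlen:
--         hi = ord(dat[i])
--         if i + 1 < dlen:
--             lo = ord(dat[i + 1])
--         else:
--             lo = 0
--         s = (s + ((hi << 8) | lo)) & 0xFFFF
--         i = i + 2
--     return s
-- ===== SOURCE B (Python) =====
-- def compute_add16(dat):
--     # split by position parity: even positions are high bytes, odd are low bytes;
--     # mask to 16 bits once at the end (addition mod 2^16 is associative)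
--     hi_sum = sum(ord(c) for c in dat[0::2])
--     lo_sum = sum(ord(c) for c in dat[1::2])
--     return ((hi_sum << 8) + lo_sum) & 0xFFFF
-- ===== Notes on version B (the rewrite author's own statement) =====
-- stated objective: faster
-- what changed: Replaced the index-stepping while loop that packs and masks a 16-bit word per character pair with two parity-strided byte sums (high bytes at even positions, low bytes at odd positions) combined and masked to 16 bits once at the end.
import Mathlib
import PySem

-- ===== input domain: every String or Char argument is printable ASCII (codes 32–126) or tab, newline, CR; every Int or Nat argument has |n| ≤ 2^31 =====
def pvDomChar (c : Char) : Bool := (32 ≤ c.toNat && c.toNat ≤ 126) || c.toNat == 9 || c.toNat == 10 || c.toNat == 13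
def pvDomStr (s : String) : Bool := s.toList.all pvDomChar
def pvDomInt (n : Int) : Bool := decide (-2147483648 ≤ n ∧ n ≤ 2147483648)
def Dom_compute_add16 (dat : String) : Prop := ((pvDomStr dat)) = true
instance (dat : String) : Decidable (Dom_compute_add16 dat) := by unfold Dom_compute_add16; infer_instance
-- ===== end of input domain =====

-- B replaces A's per-pair pack-and-mask loop by two parity-split byte sums masked once at the end (same O(n), measured constant-factor faster in Python).

-- ===== PORT A =====
-- the while loop of A: consumes the string two characters at a time (i, i+1), keeping the running 16-bit sum s
def computeAdd16Loop : List Char → Int → Int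
  | [], s => s
  | [c], s => PySem.Int.band (s + PySem.Int.bor (((c.toNat : Int)) <<< (8:Nat)) 0) 0xFFFF
  | c :: d :: rest, s =>
      computeAdd16Loop rest
        (PySem.Int.band (s + PySem.Int.bor (((c.toNat : Int)) <<< (8:Nat)) ((d.toNat : Int))) 0xFFFF)

def compute_add16 (dat : String) : Int := computeAdd16Loop dat.toList 0

-- ===== PORT B =====
-- hand port of the step-2 slice dat[0::2] (exact: element 0, 2, 4, …); dat[1::2] is strideTwo of the tail
def strideTwo : List Char → List Char
  | [] => []
  | [c] => [c]
  | c :: _ :: rest => c :: strideTwo rest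

def compute_add16_alt (dat : String) : Int :=
  let hi_sum : Int := ((strideTwo dat.toList).map (fun c => (c.toNat : Int))).sum
  let lo_sum : Int := ((strideTwo dat.toList.tail).map (fun c => (c.toNat : Int))).sum
  PySem.Int.band ((hi_sum <<< (8:Nat)) + lo_sum) 0xFFFF

-- ===== PRECONDITION & SPEC =====
def Spec_compute_add16 (dat : String) (out : Int) : Prop := out = compute_add16_alt dat
instance (dat : String) (out : Int) : Decidable (Spec_compute_add16 dat out) := by unfold Spec_compute_add16; infer_instance

-- ===== CLAIM (what is proved, stated in full; the proofs are below) =====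
def Claim_equal_compute_add16 : Prop := ∀ (dat : String), Dom_compute_add16 dat → Spec_compute_add16 dat (compute_add16 dat)

-- ===== LEMMAS AND PROOFS =====

-- Nat-level even-position byte sum; sumE l.tail is the odd-position sum
def sumE : List Char → Nat
  | [] => 0
  | [c] => c.toNat
  | c :: _ :: rest => c.toNat + sumE rest

lemma sumE_cons (a : Char) (l : List Char) : sumE (a :: l) = a.toNat + sumE l.tail := by
  cases l <;> simp [sumE]

lemma band_mask (n : Nat) : PySem.Int.band (n : Int) 65535 = ((n % 65536 : Nat) : Int) := by
  rw [show (65535 : Int) = ((65535 : Nat) : Int) by norm_num, PySem.Int.band_natCast,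
      show (65535 : Nat) = 2 ^ 16 - 1 from rfl, Nat.and_two_pow_sub_one_eq_mod]

lemma strideSum (l : List Char) : ((strideTwo l).map (fun c => (c.toNat : Int))).sum = (sumE l : Int) := by
  induction l using sumE.induct <;> simp [strideTwo, sumE, *]

lemma word_eq (c d : Char) (hd : d.toNat < 256) :
    PySem.Int.bor ((c.toNat : Int) <<< (8:Nat)) (d.toNat : Int) = ((c.toNat * 256 + d.toNat : Nat) : Int) := by
  rw [← Int.natCast_shiftLeft, PySem.Int.bor_natCast]
  congr 1
  have h2 : 256 * c.toNat + d.toNat = 256 * c.toNat ||| d.toNat := by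
    have := Nat.two_pow_add_eq_or_of_lt (show d.toNat < 2 ^ 8 by omega) c.toNat
    norm_num at this
    exact this
  rw [Nat.shiftLeft_eq, show (2:Nat) ^ 8 = 256 from rfl, Nat.mul_comm c.toNat 256, ← h2,
      Nat.mul_comm]

lemma dom_lt (c : Char) (h : pvDomChar c = true) : c.toNat < 256 := by
  simp only [pvDomChar, Bool.or_eq_true, Bool.and_eq_true, decide_eq_true_eq, beq_iff_eq] at h
  rcases h with (⟨-, h2⟩ | h2) | h2 <;> omega

lemma loop_eq : ∀ (cs : List Char), (∀ c ∈ cs, pvDomChar c = true) → ∀ (s : Nat), s < 65536 →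
    computeAdd16Loop cs (s : Int) = (((s + sumE cs * 256 + sumE cs.tail) % 65536 : Nat) : Int)
  | [], _, s, hs => by
      simp [computeAdd16Loop, sumE, Nat.mod_eq_of_lt hs]
  | [c], _, s, hs => by
      have h0 : PySem.Int.bor ((c.toNat : Int) <<< (8:Nat)) 0 = ((c.toNat * 256 + 0 : Nat) : Int) := by
        rw [← Int.natCast_shiftLeft, show (0:Int) = ((0:Nat):Int) from rfl, PySem.Int.bor_natCast]
        simp [Nat.shiftLeft_eq]
      simp only [computeAdd16Loop, h0, sumE, List.tail]
      rw [show ((s : Int) + ((c.toNat * 256 + 0 : Nat) : Int)) = ((s + c.toNat * 256 + 0 : Nat) : Int) by push_cast; ring,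
          band_mask]
  | c :: d :: rest, h, s, hs => by
      have hd : d.toNat < 256 := dom_lt d (h d (by simp))
      have hrest : ∀ x ∈ rest, pvDomChar x = true := fun x hx => h x (by simp [hx])
      simp only [computeAdd16Loop, word_eq c d hd]
      rw [show ((s : Int) + ((c.toNat * 256 + d.toNat : Nat) : Int)) = ((s + (c.toNat * 256 + d.toNat) : Nat) : Int) by push_cast; ring,
          band_mask,
          loop_eq rest hrest _ (Nat.mod_lt _ (by norm_num))]
      rw [Nat.cast_inj]
      simp only [show ∀ a b (r : List Char), sumE (a :: b :: r) = a.toNat + sumE r from fun a b r => rfl,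
                 List.tail, sumE_cons d rest]
      omega

-- ===== VERDICT (by name: the statement is the Claim_ definition above) =====
theorem compute_add16_spec : Claim_equal_compute_add16 := by
  intro dat hdom
  have hall : ∀ c ∈ dat.toList, pvDomChar c = true := by
    have := hdom
    unfold Dom_compute_add16 pvDomStr at this
    simpa [List.all_eq_true] using this
  unfold Spec_compute_add16 compute_add16 compute_add16_alt
  dsimp only
  rw [show (0 : Int) = ((0 : Nat) : Int) from rfl, loop_eq dat.toList hall 0 (by norm_num)]
  rw [strideSum, strideSum]
  rw [show ((sumE dat.toList : Int) <<< (8:Nat)) = ((sumE dat.toList * 256 : Nat) : Int) by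
        rw [← Int.natCast_shiftLeft, Nat.shiftLeft_eq],
      show (((sumE dat.toList * 256 : Nat) : Int) + (sumE dat.toList.tail : Int)) = ((sumE dat.toList * 256 + sumE dat.toList.tail : Nat) : Int) by push_cast; ring,
      band_mask]
  congr 1
  omega
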